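-- pv_equiv track=rewrite | github.com/giordamaug/Embed_Clinical_Sequences_Asplenic | utils.py | group_events_by_visit_old
-- ===== SOURCE A (Python) =====
-- from collections import defaultdict
--
-- def group_events_by_visit_old(sequences, on_field='date'):
--     visit_sequences= {}
--     for pid, events in sequences.items():
--         grouped_by_date = defaultdict(list)
--         for event in events:
--             date = event[on_field]
--             grouped_by_date[date].append(event)
--         visit_sequences[pid] = [(grouped_by_date[date], date) for date in sorted(grouped_by_date.keys())]
--     return visit_sequences
-- ===== SOURCE B (Python) =====
-- def group_events_by_visit_old(sequences, on_field='date'):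
--     # Per patient: sort the distinct dates once, then collect each date's
--     # events with a filter pass -- no defaultdict bucketing.
--     visit_sequences = {}
--     for pid, events in sequences.items():
--         dates = sorted({event[on_field] for event in events})
--         visit_sequences[pid] = [([e for e in events if e[on_field] == d], d)
--                                 for d in dates]
--     return visit_sequences
-- ===== Notes on version B (the rewrite author's own statement) =====
-- stated objective: simpler
-- what changed: Per patient, the defaultdict bucketing pass followed by sorted(keys) is replaced by sorting the distinct dates once (sorted(set)) and collecting each date's events with a filter comprehension; the defaultdict disappears.
import Mathlib
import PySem

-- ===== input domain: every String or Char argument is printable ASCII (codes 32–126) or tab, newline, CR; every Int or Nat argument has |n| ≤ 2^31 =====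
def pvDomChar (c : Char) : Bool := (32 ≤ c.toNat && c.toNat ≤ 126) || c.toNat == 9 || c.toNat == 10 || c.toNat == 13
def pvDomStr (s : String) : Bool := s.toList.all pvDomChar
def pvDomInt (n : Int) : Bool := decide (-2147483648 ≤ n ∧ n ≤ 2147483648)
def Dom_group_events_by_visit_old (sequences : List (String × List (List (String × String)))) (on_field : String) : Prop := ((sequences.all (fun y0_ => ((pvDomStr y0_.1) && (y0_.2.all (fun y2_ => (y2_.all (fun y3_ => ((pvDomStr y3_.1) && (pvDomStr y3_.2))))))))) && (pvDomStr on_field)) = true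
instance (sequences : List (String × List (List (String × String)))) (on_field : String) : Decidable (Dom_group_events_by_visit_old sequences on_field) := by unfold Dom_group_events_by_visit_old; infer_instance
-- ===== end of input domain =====

-- B replaces A's defaultdict bucketing per patient by sorting the distinct dates once and
-- collecting each date's events with a filter pass (objective: simpler; same results).


-- ===== PORT A =====
-- event[on_field]: the event is a Python dict; Dict.ofList is dict(pairs). Under Pre_ the key
-- is present, so getD with "" is exact (Python raises KeyError only outside Pre_).
def pvField (on_field : String) (e : List (String × String)) : String :=
  (PySem.Dict.ofList e).getD on_field ""

-- A's inner loop: grouped_by_date = defaultdict(list); append = modify with default []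
def pvBucket (on_field : String) (events : List (List (String × String))) :
    PySem.Dict String (List (List (String × String))) :=
  events.foldl (fun d e => d.modify (pvField on_field e) [] (fun v => v ++ [e])) PySem.Dict.empty

-- A's per-patient value: [(grouped_by_date[date], date) for date in sorted(grouped_by_date.keys())]
def pvVisitA (on_field : String) (events : List (List (String × String))) :
    List ((List (List (String × String))) × String) :=
  (PySem.List.sorted (pvBucket on_field events).keys (fun x => x) false).map
    (fun date => ((pvBucket on_field events).getD date [], date))

-- literal transliteration of A: defaultdict(list) bucketing (modify with default []),
-- then [(bucket, date) for date in sorted(keys)]; the outer dict built by insertion.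
def group_events_by_visit_old (sequences : List (String × List (List (String × String)))) (on_field : String) : List (String × List ((List (List (String × String))) × String)) :=
  (sequences.foldl (fun acc p => acc.insert p.1 (pvVisitA on_field p.2))
    (PySem.Dict.empty : PySem.Dict String (List ((List (List (String × String))) × String)))).items

-- ===== PORT B =====
-- transliteration of Source B: per patient, sorted(set of dates) then a filter pass per date;
-- with distinct pids (Pre_) the outer dict is the association list in input order (map).
def group_events_by_visit_old_alt (sequences : List (String × List (List (String × String)))) (on_field : String) : List (String × List ((List (List (String × String))) × String)) :=
  sequences.map (fun p =>
    (p.1, (PySem.List.sorted (PySem.Set.ofList (p.2.map (pvField on_field))) (fun x => x) false).map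
      (fun d => (p.2.filter (fun e => pvField on_field e == d), d))))

-- ===== PRECONDITION & SPEC =====
-- Pre_ excludes events missing the on_field key (Python A raises KeyError there, B too) and
-- association lists with duplicate keys — duplicate patient ids or duplicate field names in an
-- event — which a Python dict argument cannot represent: the dict merge order is accidental.
def Pre_group_events_by_visit_old (sequences : List (String × List (List (String × String)))) (on_field : String) : Prop :=
  (sequences.map Prod.fst).Nodup ∧
  ∀ p ∈ sequences, ∀ e ∈ p.2, (e.map Prod.fst).Nodup ∧ on_field ∈ e.map Prod.fst
instance (sequences : List (String × List (List (String × String)))) (on_field : String) : Decidable (Pre_group_events_by_visit_old sequences on_field) := by unfold Pre_group_events_by_visit_old; infer_instance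

def pvWitness_group_events_by_visit_old : (List (String × List (List (String × String)))) × String :=
  ([("p1", [[("date", "2"), ("x", "a")], [("date", "1")], [("date", "2")]]), ("p2", [])], "date")

def Spec_group_events_by_visit_old (sequences : List (String × List (List (String × String)))) (on_field : String) (out : List (String × List ((List (List (String × String))) × String))) : Prop := out = group_events_by_visit_old_alt sequences on_field
-- (instance search alone exceeds its size limit on this deeply nested type; the same
-- structural instance is given explicitly)
instance (sequences : List (String × List (List (String × String)))) (on_field : String) (out : List (String × List ((List (List (String × String))) × String))) : Decidable (Spec_group_events_by_visit_old sequences on_field out) := by unfold Spec_group_events_by_visit_old; exact @instDecidableEqList _ instDecidableEqProd out (group_events_by_visit_old_alt sequences on_field)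

-- ===== CLAIM (what is proved, stated in full; the proofs are below) =====
def Claim_equal_group_events_by_visit_old : Prop := ∀ (sequences : List (String × List (List (String × String)))) (on_field : String), Dom_group_events_by_visit_old sequences on_field → Pre_group_events_by_visit_old sequences on_field → Spec_group_events_by_visit_old sequences on_field (group_events_by_visit_old sequences on_field)

-- ===== LEMMAS AND PROOFS =====

-- A's per-event bucketing loop, rewritten over (date, event) pairs so the PySem grouping lemmas apply.
theorem pv_bucket_eq_pairs (on_field : String) (events : List (List (String × String))) :
    pvBucket on_field events
      = (events.map (fun e => (pvField on_field e, e))).foldl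
          (fun d q => d.modify q.1 [] (fun v => v ++ [q.2])) PySem.Dict.empty := by
  rw [pvBucket, List.foldl_map]

-- the bucket of a date is exactly the filter of the events with that date
theorem pv_bucket_getD (on_field : String) (events : List (List (String × String))) (c : String) :
    (pvBucket on_field events).getD c []
      = events.filter (fun e => pvField on_field e == c) := by
  rw [pv_bucket_eq_pairs, PySem.Dict.getD_foldl_modify_append]
  rw [List.filter_map]
  simp [List.map_map, Function.comp_def]

-- the bucket dict's keys are the distinct dates in first-occurrence order
theorem pv_bucket_keys (on_field : String) (events : List (List (String × String))) :
    (pvBucket on_field events).keys = PySem.Set.ofList (events.map (pvField on_field)) := by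
  rw [pv_bucket_eq_pairs, PySem.Dict.keys_foldl_modify_key]
  simp [PySem.Dict.keys_empty]
  rfl

-- ===== VERDICT (by name: the statement is the Claim_ definition above) =====
theorem group_events_by_visit_old_spec : Claim_equal_group_events_by_visit_old := by
  intro sequences on_field _hDom hPre
  unfold Spec_group_events_by_visit_old group_events_by_visit_old group_events_by_visit_old_alt
  rw [PySem.Dict.items_foldl_insert_fresh sequences Prod.fst (fun p => pvVisitA on_field p.2)
        PySem.Dict.empty (fun a _ => PySem.Dict.contains_empty _) hPre.1]
  simp only [PySem.Dict.empty, List.nil_append]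
  refine List.map_congr_left (fun p _hp => ?_)
  simp only [pvVisitA, pv_bucket_keys, Prod.mk.injEq, true_and]
  exact List.map_congr_left (fun date _ => by rw [pv_bucket_getD])
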